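-- pv_equiv track=rewrite | github.com/CameronLonsdale/truffleboar | truffleboar/util.py | get_strings_of_set
-- ===== SOURCE A (Python) =====
-- from typing import Iterable
--
-- def get_strings_of_set(text: str, char_set: Iterable[str], threshold_length: int) -> Iterable[str]:
--     """
--     Find strings constructed from consecutive letters in char_set. Only return strings
--     greater than or equal to threshold_length
--     """
--     count = 0
--     letters = ""
--     strings = []
--
--     for char in text:
--         if char in char_set:
--             letters += char
--             count += 1
--         else:
--             if count > threshold_length:
--                 strings.append(letters)
--             letters = ""
--             count = 0
--
--     if count > threshold_length:
--         strings.append(letters)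
--
--     return strings
-- ===== SOURCE B (Python) =====
-- def get_strings_of_set(text, char_set, threshold_length):
--     # Staged: locate the separator positions, turn them into (a, b) boundary
--     # pairs, slice the text between consecutive boundaries, then filter by length.
--     seps = [i for i, c in enumerate(text) if c not in char_set]
--     bounds = [-1] + seps + [len(text)]
--     segments = [text[a + 1:b] for a, b in zip(bounds, bounds[1:])]
--     return [s for s in segments if len(s) > threshold_length]
-- ===== Notes on version B (the rewrite author's own statement) =====
-- stated objective: alternative
-- what changed: B is a staged pipeline: it first lists the separator positions via enumerate, turns them into consecutive boundary pairs with zip, slices the text between each pair of boundaries, and finally filters the segments by length, replacing A's single-pass count/letters accumulator with its in-loop and post-loop flushes.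
import Mathlib
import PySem

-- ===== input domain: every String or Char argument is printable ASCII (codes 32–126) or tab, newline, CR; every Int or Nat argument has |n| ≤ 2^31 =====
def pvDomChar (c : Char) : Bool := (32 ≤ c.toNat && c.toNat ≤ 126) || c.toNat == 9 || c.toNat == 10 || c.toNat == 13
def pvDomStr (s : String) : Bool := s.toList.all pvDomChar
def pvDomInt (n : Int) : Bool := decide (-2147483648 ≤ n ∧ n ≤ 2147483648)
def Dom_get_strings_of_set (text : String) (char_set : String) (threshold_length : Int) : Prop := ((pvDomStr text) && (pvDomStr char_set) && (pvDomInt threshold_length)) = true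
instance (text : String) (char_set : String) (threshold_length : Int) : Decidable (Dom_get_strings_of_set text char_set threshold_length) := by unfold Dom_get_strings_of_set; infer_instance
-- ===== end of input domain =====

-- B replaces A's single-pass count/letters accumulator (with its in-loop and post-loop
-- flushes) by a staged pipeline: separator positions → consecutive boundary pairs →
-- slices between boundaries → length filter (objective: alternative decomposition, not speed).

-- ===== PORT A =====
-- state = (count, letters, strings); letters kept as List Char, turned into a String
-- exactly where Python appends it to `strings`.
def get_strings_of_set (text : String) (char_set : String) (threshold_length : Int) : List String :=
  let st := text.toList.foldl
    (fun (st : Int × List Char × List String) char =>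
      if char_set.toList.contains char then
        (st.1 + 1, st.2.1 ++ [char], st.2.2)
      else
        (0, [], if st.1 > threshold_length then st.2.2 ++ [String.mk st.2.1] else st.2.2))
    (0, [], [])
  if st.1 > threshold_length then st.2.2 ++ [String.mk st.2.1] else st.2.2

-- ===== PORT B =====
-- [i for i,c in enumerate(text) if c not in char_set] → enumerate/filter/map;
-- bounds[1:] → bounds.drop 1 (exact: all of bounds is a list, 1 ≥ 0); zip truncates like
-- Python's zip; text[a+1:b] → PySem.List.slice (exact Python slicing); the final
-- comprehension is filter-then-map (segments become Strings at that point).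
def get_strings_of_set_alt (text : String) (char_set : String) (threshold_length : Int) : List String :=
  let cs := text.toList
  let seps : List Int :=
    ((PySem.List.enumerate cs 0).filter (fun ic => !(char_set.toList.contains ic.2))).map (fun ic => ic.1)
  let bounds : List Int := [-1] ++ (seps ++ [PySem.List.len cs])
  let segments := (bounds.zip (bounds.drop 1)).map
    (fun ab => PySem.List.slice cs (some (ab.1 + 1)) (some ab.2))
  (segments.filter (fun s => PySem.List.len s > threshold_length)).map String.mk

-- ===== PRECONDITION & SPEC =====
def Spec_get_strings_of_set (text : String) (char_set : String) (threshold_length : Int) (out : List String) : Prop := out = get_strings_of_set_alt text char_set threshold_length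
instance (text : String) (char_set : String) (threshold_length : Int) (out : List String) : Decidable (Spec_get_strings_of_set text char_set threshold_length out) := by unfold Spec_get_strings_of_set; infer_instance

-- ===== CLAIM (what is proved, stated in full; the proofs are below) =====
def Claim_equal_get_strings_of_set : Prop := ∀ (text : String) (char_set : String) (threshold_length : Int), Dom_get_strings_of_set text char_set threshold_length → Spec_get_strings_of_set text char_set threshold_length (get_strings_of_set text char_set threshold_length)

-- ===== LEMMAS AND PROOFS =====

-- Proof-local copies of A's loop body and finisher.
def pvStepA (p : Char → Bool) (t : Int) (st : Int × List Char × List String) (char : Char) : Int × List Char × List String :=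
  if p char then
    (st.1 + 1, st.2.1 ++ [char], st.2.2)
  else
    (0, [], if st.1 > t then st.2.2 ++ [String.mk st.2.1] else st.2.2)

def pvFinishA (t : Int) (st : Int × List Char × List String) : List String :=
  if st.1 > t then st.2.2 ++ [String.mk st.2.1] else st.2.2

-- Canonical "split at non-members, keeping empty segments" (recursion on the text).
def pvSplit (p : Char → Bool) : List Char → List (List Char)
  | [] => [[]]
  | c :: cs => if p c then (pvSplit p cs).modifyHead (fun s => c :: s) else [] :: pvSplit p cs

-- Canonical separator positions.
def pvSeps (p : Char → Bool) : List Char → List Int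
  | [] => []
  | c :: cs =>
      if p c then (pvSeps p cs).map (· + 1) else 0 :: (pvSeps p cs).map (· + 1)

-- Consecutive pairs (x :: l).zip l, structurally.
def pvPairs (x : Int) : List Int → List (Int × Int)
  | [] => []
  | y :: l => (x, y) :: pvPairs y l

def pvOut (t : Int) (segs : List (List Char)) : List String :=
  (segs.filter (fun s => PySem.List.len s > t)).map String.mk

-- ---- A-side: the fold equals filter/map over pvSplit ----

lemma pv_split_ne_nil (p : Char → Bool) (cs : List Char) : pvSplit p cs ≠ [] := by
  cases cs with
  | nil => simp [pvSplit]
  | cons c cs =>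
    simp only [pvSplit]
    split_ifs
    · cases h : pvSplit p cs with
      | nil => exact absurd h (pv_split_ne_nil p cs)
      | cons a l => simp
    · simp

-- A's loop in lock step with pvSplit: the already-flushed output is the filtered/mapped
-- list of finished segments, the pending segment is prepended to pvSplit's head.
lemma pv_loopA_eq (p : Char → Bool) (t : Int) :
    ∀ (cs : List Char) (letters : List Char) (done : List (List Char)),
    pvFinishA t (cs.foldl (pvStepA p t) ((letters.length : Int), letters, pvOut t done))
      = pvOut t (done ++ (pvSplit p cs).modifyHead (fun s => letters ++ s)) := by
  intro cs
  induction cs with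
  | nil =>
    intro letters done
    simp only [List.foldl_nil, pvFinishA, pvSplit, List.modifyHead, pvOut]
    by_cases h : (letters.length : Int) > t <;>
      simp [List.filter_append, PySem.List.len_eq, h]
  | cons c cs ih =>
    intro letters done
    by_cases hp : p c = true
    · have hA : pvStepA p t ((letters.length : Int), letters, pvOut t done) c
          = (((letters ++ [c]).length : Int), letters ++ [c], pvOut t done) := by
        simp [pvStepA, hp, List.length_append]
      rw [List.foldl_cons, hA, ih (letters ++ [c]) done]
      have hsplit : pvSplit p (c :: cs) = (pvSplit p cs).modifyHead (fun s => c :: s) := by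
        simp [pvSplit, hp]
      rw [hsplit]
      cases h : pvSplit p cs with
      | nil => exact absurd h (pv_split_ne_nil p cs)
      | cons a l => simp [List.modifyHead]
    · have hA : pvStepA p t ((letters.length : Int), letters, pvOut t done) c
          = ((([] : List Char).length : Int), ([] : List Char),
              pvOut t (done ++ [letters])) := by
        simp only [pvStepA, hp, Bool.false_eq_true, if_false]
        refine Prod.ext rfl (Prod.ext rfl ?_)
        simp only [pvOut]
        by_cases h : (letters.length : Int) > t <;>
          simp [List.filter_append, PySem.List.len_eq, h]
      rw [List.foldl_cons, hA, ih [] (done ++ [letters])]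
      have hsplit : pvSplit p (c :: cs) = [] :: pvSplit p cs := by
        simp [pvSplit, hp]
      rw [hsplit]
      cases h : pvSplit p cs with
      | nil => exact absurd h (pv_split_ne_nil p cs)
      | cons a l => simp [List.modifyHead]

-- ---- B-side: enumerate/filter/map equals pvSeps, zip equals pvPairs ----

lemma pv_seps_eq (p : Char → Bool) :
    ∀ (cs : List Char) (s : Int),
    ((PySem.List.enumerate cs s).filter (fun ic => !(p ic.2))).map (fun ic => ic.1)
      = (pvSeps p cs).map (· + s) := by
  intro cs
  induction cs with
  | nil => intro s; simp [pvSeps, PySem.List.enumerate_nil]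
  | cons c cs ih =>
    intro s
    rw [PySem.List.enumerate_cons]
    simp only [pvSeps, List.filter_cons]
    by_cases hp : p c = true
    · simp only [hp, Bool.not_true, Bool.false_eq_true, if_false, if_true,
        ih (s + 1), List.map_map]
      apply List.map_congr_left
      intro x _
      simp only [Function.comp_apply]
      omega
    · have hp' : p c = false := by simpa using hp
      simp only [hp', Bool.not_false, if_true, Bool.false_eq_true, if_false,
        List.map_cons, List.map_map, ih (s + 1)]
      congr 1
      · omega
      · apply List.map_congr_left
        intro x _
        simp only [Function.comp_apply]
        omega

lemma pv_pairs_eq_zip (l : List Int) : ∀ x : Int, (x :: l).zip l = pvPairs x l := by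
  induction l with
  | nil => intro x; simp [pvPairs]
  | cons y l ih => intro x; simp [pvPairs, List.zip_cons_cons, ih y]

lemma pv_seps_nonneg (p : Char → Bool) :
    ∀ (cs : List Char), ∀ i ∈ pvSeps p cs, 0 ≤ i := by
  intro cs
  induction cs with
  | nil => simp [pvSeps]
  | cons c cs ih =>
    intro i hi
    simp only [pvSeps] at hi
    split_ifs at hi with hp
    · obtain ⟨j, hj, rfl⟩ := List.mem_map.mp hi
      have := ih j hj; omega
    · rw [List.mem_cons] at hi
      rcases hi with rfl | h
      · omega
      · obtain ⟨j, hj, rfl⟩ := List.mem_map.mp h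
        have := ih j hj; omega

-- One cons on the text shifts a slice with nonnegative bounds.
lemma pv_slice_shift (c : Char) (cs : List Char) (a b : Int) (ha : 0 ≤ a) (hb : 0 ≤ b) :
    PySem.List.slice (c :: cs) (some (a + 1)) (some (b + 1))
      = PySem.List.slice cs (some a) (some b) := by
  rw [PySem.List.slice_toNat _ (by omega) (by omega), PySem.List.slice_toNat _ ha hb]
  have h1 : (a + 1).toNat = a.toNat + 1 := by omega
  rw [h1, List.drop_succ_cons]
  congr 1
  omega

-- Shifting every boundary by one and consing c onto the text leaves the slices unchanged.
lemma pv_pairs_shift_slice (c : Char) (cs : List Char) :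
    ∀ (l : List Int) (x : Int), -1 ≤ x → (∀ i ∈ l, 0 ≤ i) →
    (pvPairs (x + 1) (l.map (· + 1))).map
        (fun ab => PySem.List.slice (c :: cs) (some (ab.1 + 1)) (some ab.2))
      = (pvPairs x l).map (fun ab => PySem.List.slice cs (some (ab.1 + 1)) (some ab.2)) := by
  intro l
  induction l with
  | nil => intro x _ _; simp [pvPairs]
  | cons y l ih =>
    intro x hx hl
    have hy : 0 ≤ y := hl y (by simp)
    simp only [List.map_cons, pvPairs, List.map_cons]
    congr 1
    · exact pv_slice_shift c cs (x + 1) y (by omega) hy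
    · exact ih y (by omega) (fun i hi => hl i (by simp [hi]))

-- The first segment of a cons: slicing [0 : b+1] out of c :: cs prepends c.
lemma pv_slice_head (c : Char) (cs : List Char) (b : Int) (hb : 0 ≤ b) :
    PySem.List.slice (c :: cs) (some (-1 + 1)) (some (b + 1))
      = c :: PySem.List.slice cs (some (-1 + 1)) (some b) := by
  rw [PySem.List.slice_toNat _ (by omega) (by omega), PySem.List.slice_toNat _ (by omega) hb]
  have hb1 : (b + 1).toNat = b.toNat + 1 := by omega
  norm_num [hb1]

-- Core: the boundary pairs sliced out of the text are exactly pvSplit.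
lemma pv_pairs_slice_eq_split (p : Char → Bool) :
    ∀ (cs : List Char),
    (pvPairs (-1) (pvSeps p cs ++ [(cs.length : Int)])).map
        (fun ab => PySem.List.slice cs (some (ab.1 + 1)) (some ab.2))
      = pvSplit p cs := by
  intro cs
  induction cs with
  | nil =>
    simp [pvSeps, pvPairs, pvSplit, PySem.List.slice_toNat]
  | cons c cs ih =>
    have hn : ((c :: cs).length : Int) = (cs.length : Int) + 1 := by simp
    have hnn : ∀ i ∈ pvSeps p cs ++ [(cs.length : Int)], 0 ≤ i := by
      intro i hi
      rcases List.mem_append.mp hi with h | h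
      · exact pv_seps_nonneg p cs i h
      · simp at h; omega
    by_cases hp : p c = true
    · -- the head segment gains c; every boundary shifts by one
      have hseps : pvSeps p (c :: cs) = (pvSeps p cs).map (· + 1) := by
        simp [pvSeps, hp]
      rw [hseps, hn]
      have hlist : (pvSeps p cs).map (· + 1) ++ [(cs.length : Int) + 1]
          = (pvSeps p cs ++ [(cs.length : Int)]).map (· + 1) := by
        simp
      rw [hlist]
      have hsplit : pvSplit p (c :: cs) = (pvSplit p cs).modifyHead (fun s => c :: s) := by
        simp [pvSplit, hp]
      rw [hsplit, ← ih]
      cases hS : pvSeps p cs with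
      | nil =>
        simp only [List.nil_append, List.map_cons, List.map_nil, pvPairs]
        rw [pv_slice_head c cs _ (by omega)]
        simp [List.modifyHead]
      | cons y l =>
        have hy : 0 ≤ y := pv_seps_nonneg p cs y (by rw [hS]; simp)
        have hln : ∀ i ∈ l ++ [(cs.length : Int)], 0 ≤ i := by
          intro i hi
          refine hnn i ?_
          rw [hS]
          simp only [List.cons_append, List.mem_cons]
          right; exact hi
        simp only [List.cons_append, List.map_cons, pvPairs]
        rw [pv_slice_head c cs y hy,
            pv_pairs_shift_slice c cs (l ++ [(cs.length : Int)]) y (by omega) hln]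
        simp [List.modifyHead]
    · -- c is a separator: a new boundary 0 appears, the empty segment is split off
      have hseps : pvSeps p (c :: cs) = 0 :: (pvSeps p cs).map (· + 1) := by
        simp [pvSeps, hp]
      rw [hseps, hn]
      have hlist : (pvSeps p cs).map (· + 1) ++ [(cs.length : Int) + 1]
          = (pvSeps p cs ++ [(cs.length : Int)]).map (· + 1) := by
        simp
      simp only [List.cons_append, pvPairs, List.map_cons]
      rw [hlist]
      have htail := pv_pairs_shift_slice c cs (pvSeps p cs ++ [(cs.length : Int)]) (-1)
        (by omega) hnn
      norm_num only at htail
      rw [htail, ih]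
      have hhead : PySem.List.slice (c :: cs) (some (-1 + 1)) (some (0 : Int))
          = ([] : List Char) := by
        rw [PySem.List.slice_toNat _ (by omega) (by omega)]
        simp
      rw [hhead]
      simp [pvSplit, hp]

-- ===== VERDICT (by name: the statement is the Claim_ definition above) =====
theorem get_strings_of_set_spec : Claim_equal_get_strings_of_set := by
  intro text char_set threshold_length _
  unfold Spec_get_strings_of_set
  set p : Char → Bool := fun c => char_set.toList.contains c with hpdef
  -- A = pvOut t (pvSplit p cs)
  have hA : get_strings_of_set text char_set threshold_length
      = pvOut threshold_length (pvSplit p text.toList) := by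
    have key := pv_loopA_eq p threshold_length text.toList [] []
    simp only [List.length_nil, Nat.cast_zero, List.nil_append] at key
    have h0 : pvOut threshold_length [] = [] := rfl
    have hmod : (pvSplit p text.toList).modifyHead (fun s => s)
        = pvSplit p text.toList := by
      cases h : pvSplit p text.toList <;> simp [List.modifyHead]
    rw [h0, hmod] at key
    calc get_strings_of_set text char_set threshold_length
        = pvFinishA threshold_length
            (text.toList.foldl (pvStepA p threshold_length) ((0 : Int), [], [])) := rfl
      _ = pvOut threshold_length (pvSplit p text.toList) := key
  -- B = pvOut t (pvSplit p cs)
  have hB : get_strings_of_set_alt text char_set threshold_length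
      = pvOut threshold_length (pvSplit p text.toList) := by
    show (((([-1] ++ ((((PySem.List.enumerate text.toList 0).filter
          (fun ic : Int × Char => !(p ic.2))).map (fun ic : Int × Char => ic.1)) ++ [PySem.List.len text.toList])).zip
          (([-1] ++ ((((PySem.List.enumerate text.toList 0).filter
          (fun ic : Int × Char => !(p ic.2))).map (fun ic : Int × Char => ic.1)) ++ [PySem.List.len text.toList])).drop 1)).map
          (fun ab : Int × Int => PySem.List.slice text.toList (some (ab.1 + 1)) (some ab.2))).filter
          (fun s : List Char => PySem.List.len s > threshold_length)).map String.mk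
        = pvOut threshold_length (pvSplit p text.toList)
    have hseps : ((PySem.List.enumerate text.toList 0).filter
          (fun ic : Int × Char => !(p ic.2))).map (fun ic : Int × Char => ic.1) = pvSeps p text.toList := by
      have := pv_seps_eq p text.toList 0
      simpa using this
    rw [hseps, PySem.List.len_eq]
    have hdrop : (([-1] ++ (pvSeps p text.toList ++ [(text.toList.length : Int)])).drop 1)
        = pvSeps p text.toList ++ [(text.toList.length : Int)] := rfl
    rw [hdrop]
    have hzip : ([-1] ++ (pvSeps p text.toList ++ [(text.toList.length : Int)])).zip
          (pvSeps p text.toList ++ [(text.toList.length : Int)])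
        = pvPairs (-1) (pvSeps p text.toList ++ [(text.toList.length : Int)]) := by
      exact pv_pairs_eq_zip _ (-1)
    rw [hzip, pv_pairs_slice_eq_split p text.toList]
    rfl
  rw [hA, hB]
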